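-- pv_equiv track=rewrite | github.com/lucainiaoge/jazzify | rules/find_key.py | rectify_key_list_with_repeatition_rewrite
-- ===== SOURCE A (Python) =====
-- UNKNOWN_KEY = "UNK"
--
-- DIM_STAY = 0
--
-- def rectify_key_list_with_repeatition_rewrite(function_key_tuples_list):
--     def is_repeating(function_key_tuples):
--         return len(function_key_tuples) == 1 and function_key_tuples[0] == (DIM_STAY, UNKNOWN_KEY)
--
--     N_chord = len(function_key_tuples_list)
--     for i in range(N_chord):
--         if is_repeating(function_key_tuples_list[i]) and i < N_chord - 1:
--             id_next_no_rep = i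
--             for j in range(i + 1, N_chord):
--                 if not is_repeating(function_key_tuples_list[j]):
--                     id_next_no_rep = j
--                     break
--
--             function_key_tuples_list[i] = []
--             for function_key_tuple in function_key_tuples_list[id_next_no_rep]:
--                 function_key_tuples_list[i].append((DIM_STAY, function_key_tuple[1]))
--     return function_key_tuples_list
-- ===== SOURCE B (Python) =====
-- UNKNOWN_KEY = "UNK"
--
-- DIM_STAY = 0
--
-- def rectify_key_list_with_repeatition_rewrite(function_key_tuples_list):
--     # Single backward pass tracking the next non-repeating entry; builds a
--     # new list instead of mutating the argument in place (A mutates its argument).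
--     def is_repeating(function_key_tuples):
--         return len(function_key_tuples) == 1 and function_key_tuples[0] == (DIM_STAY, UNKNOWN_KEY)
--
--     out = []
--     nxt = None          # nearest non-repeating entry to the right (original values)
--     last = True
--     for entry in reversed(function_key_tuples_list):
--         if is_repeating(entry) and not last:
--             out.append([(DIM_STAY, k) for _, k in nxt] if nxt is not None else entry)
--         else:
--             out.append(entry)
--         if not is_repeating(entry):
--             nxt = entry
--         last = False
--     out.reverse()
--     return out
-- ===== Notes on version B (the rewrite author's own statement) =====
-- stated objective: alternative
-- what changed: Replaces the forward loop with an inner rescan for the next non-repeating entry by a single backward pass that carries the nearest non-repeating entry, building a new list instead of mutating the argument.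
-- intended difference: On lists whose last two entries are both [(0,'UNK')] (a trailing repeating marker with no non-repeating entry after it), A overwrites each such marker with an empty entry because it assigns lst[i]=[] and then copies from lst[id_next_no_rep] which aliases the same now-empty list, while B leaves the marker [(0,'UNK')] unchanged, the intended 'nothing to fill from' behaviour. — e.g. on rectify_key_list_with_repeatition_rewrite([[(0, "UNK")], [(0, "UNK")]]): A returns [[], [(0, "UNK")]], B returns [[(0, "UNK")], [(0, "UNK")]]
import Mathlib
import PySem

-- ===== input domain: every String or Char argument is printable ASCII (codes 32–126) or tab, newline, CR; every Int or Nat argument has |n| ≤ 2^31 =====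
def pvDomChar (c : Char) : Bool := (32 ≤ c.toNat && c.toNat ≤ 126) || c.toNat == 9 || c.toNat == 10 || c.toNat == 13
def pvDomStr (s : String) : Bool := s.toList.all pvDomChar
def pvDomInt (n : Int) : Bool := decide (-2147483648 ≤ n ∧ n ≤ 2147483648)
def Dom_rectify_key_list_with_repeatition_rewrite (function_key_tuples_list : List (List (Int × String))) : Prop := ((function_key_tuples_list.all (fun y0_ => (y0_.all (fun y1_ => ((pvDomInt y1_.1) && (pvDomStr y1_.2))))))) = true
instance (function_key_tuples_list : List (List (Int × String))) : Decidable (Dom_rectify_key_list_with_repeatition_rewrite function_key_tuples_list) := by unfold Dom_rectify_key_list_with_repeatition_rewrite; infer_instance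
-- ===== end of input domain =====

-- B replaces A's forward loop with inner rescans by a single backward pass carrying the
-- nearest non-repeating entry; note A mutates its argument in place while B builds a new
-- list — the equivalence proved here is about the return value only.
-- A and B differ on the D_ inputs below (A's self-aliasing accident); B returns the intended value there.

-- ===== PORT A =====
-- shared helper: the inner 'is_repeating' (identical in Source A and Source B)
def pvIsRep (l : List (Int × String)) : Bool :=
  (l.length == 1) && (PySem.List.pyGet? l 0 == some ((0 : Int), "UNK"))

-- inner 'for j in range(i+1, N): … break' loop, as a fold with a found-flag
def pvInnerA (lst : List (List (Int × String))) (st : Int × Bool) (j : Int) : Int × Bool :=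
  if st.2 then st
  else if !pvIsRep (PySem.List.pyGetD lst j []) then (j, true) else st

def pvStepA (N : Int) (lst : List (List (Int × String))) (i : Int) : List (List (Int × String)) :=
  if pvIsRep (PySem.List.pyGetD lst i []) && decide (i < N - 1) then
    let scan := (PySem.List.pyRange (i + 1) N 1).foldl (pvInnerA lst) (i, false)
    -- Python assigns lst[i] = [] BEFORE copying from lst[id_next_no_rep]; when the two indices
    -- coincide the source aliases the same, now-empty list, so the append loop copies nothing —
    -- reading from lst1 (after the assignment) reproduces that exactly.
    let lst1 := PySem.List.pySetD lst i []
    let newv := (PySem.List.pyGetD lst1 scan.1 []).foldl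
        (fun acc t => acc ++ [((0 : Int), t.2)]) []
    PySem.List.pySetD lst1 i newv
  else lst

def rectify_key_list_with_repeatition_rewrite (function_key_tuples_list : List (List (Int × String))) : List (List (Int × String)) :=
  let N : Int := (function_key_tuples_list.length : Int)
  (PySem.List.pyRange 0 N 1).foldl (pvStepA N) function_key_tuples_list

-- ===== PORT B =====
-- one step of Source B's backward loop; state = (out, nxt, last)
def pvStepB (st : List (List (Int × String)) × Option (List (Int × String)) × Bool)
    (entry : List (Int × String)) : List (List (Int × String)) × Option (List (Int × String)) × Bool :=
  let out :=
    if pvIsRep entry && !st.2.2 then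
      st.1 ++ [match st.2.1 with
               | some e => e.map (fun t => ((0 : Int), t.2))
               | none => entry]
    else st.1 ++ [entry]
  let nxt := if !pvIsRep entry then some entry else st.2.1
  (out, nxt, false)

def rectify_key_list_with_repeatition_rewrite_alt (function_key_tuples_list : List (List (Int × String))) : List (List (Int × String)) :=
  (function_key_tuples_list.reverse.foldl pvStepB ([], none, true)).1.reverse

-- ===== PRECONDITION & SPEC =====
-- On lists whose last two entries are both [(0,"UNK")] (a trailing repeating marker with no
-- non-repeating entry after it), A overwrites each such marker with an empty entry — it first
-- empties lst[i] and then copies from lst[id_next_no_rep], which aliases the same now-empty list — while B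
-- leaves the marker [(0,"UNK")] unchanged, the intended 'nothing to fill from' behaviour.
def D_rectify_key_list_with_repeatition_rewrite (function_key_tuples_list : List (List (Int × String))) : Prop :=
  function_key_tuples_list.drop (function_key_tuples_list.length - 2) =
    ([[(0, "UNK")], [(0, "UNK")]] : List (List (Int × String)))

instance (function_key_tuples_list : List (List (Int × String))) : Decidable (D_rectify_key_list_with_repeatition_rewrite function_key_tuples_list) := by unfold D_rectify_key_list_with_repeatition_rewrite; infer_instance

def Spec_rectify_key_list_with_repeatition_rewrite (function_key_tuples_list : List (List (Int × String))) (out : List (List (Int × String))) : Prop := ¬ D_rectify_key_list_with_repeatition_rewrite function_key_tuples_list → out = rectify_key_list_with_repeatition_rewrite_alt function_key_tuples_list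
instance (function_key_tuples_list : List (List (Int × String))) (out : List (List (Int × String))) : Decidable (Spec_rectify_key_list_with_repeatition_rewrite function_key_tuples_list out) := by unfold Spec_rectify_key_list_with_repeatition_rewrite; infer_instance

def pvDiffWitness_rectify_key_list_with_repeatition_rewrite : (List (List (Int × String))) :=
  [[(0, "UNK")], [(0, "UNK")]]
def pvDiffWitnessOut_rectify_key_list_with_repeatition_rewrite : (List (List (Int × String))) × (List (List (Int × String))) :=
  ([[], [(0, "UNK")]], [[(0, "UNK")], [(0, "UNK")]])

-- ===== CLAIM (what is proved, stated in full; the proofs are below) =====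
def Claim_unchanged_rectify_key_list_with_repeatition_rewrite : Prop := ∀ (function_key_tuples_list : List (List (Int × String))), Dom_rectify_key_list_with_repeatition_rewrite function_key_tuples_list → Spec_rectify_key_list_with_repeatition_rewrite function_key_tuples_list (rectify_key_list_with_repeatition_rewrite function_key_tuples_list)
def Claim_changed_rectify_key_list_with_repeatition_rewrite : Prop := Dom_rectify_key_list_with_repeatition_rewrite (pvDiffWitness_rectify_key_list_with_repeatition_rewrite) ∧ D_rectify_key_list_with_repeatition_rewrite (pvDiffWitness_rectify_key_list_with_repeatition_rewrite) ∧ rectify_key_list_with_repeatition_rewrite (pvDiffWitness_rectify_key_list_with_repeatition_rewrite) = pvDiffWitnessOut_rectify_key_list_with_repeatition_rewrite.1 ∧ rectify_key_list_with_repeatition_rewrite_alt (pvDiffWitness_rectify_key_list_with_repeatition_rewrite) = pvDiffWitnessOut_rectify_key_list_with_repeatition_rewrite.2 ∧ pvDiffWitnessOut_rectify_key_list_with_repeatition_rewrite.1 ≠ pvDiffWitnessOut_rectify_key_list_with_repeatition_rewrite.2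
def Claim_exact_rectify_key_list_with_repeatition_rewrite : Prop := ∀ (function_key_tuples_list : List (List (Int × String))), Dom_rectify_key_list_with_repeatition_rewrite function_key_tuples_list → D_rectify_key_list_with_repeatition_rewrite function_key_tuples_list → rectify_key_list_with_repeatition_rewrite function_key_tuples_list ≠ rectify_key_list_with_repeatition_rewrite_alt function_key_tuples_list

-- ===== LEMMAS AND PROOFS =====

-- the rewritten entry [(DIM_STAY, k) for _, k in e]
def pvRw (e : List (Int × String)) : List (Int × String) := e.map (fun t => ((0 : Int), t.2))

-- the nearest non-repeating entry of a suffix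
def pvNxt (l : List (List (Int × String))) : Option (List (Int × String)) :=
  l.find? (fun e => !pvIsRep e)

-- functional characterisation of A's result
def pvGA : List (List (Int × String)) → List (List (Int × String))
  | [] => []
  | x :: rest =>
    (if pvIsRep x && !rest.isEmpty then
       match pvNxt rest with
       | some e => pvRw e
       | none => []
     else x) :: pvGA rest

-- functional characterisation of B's result
def pvGB : List (List (Int × String)) → List (List (Int × String))
  | [] => []
  | x :: rest =>
    (if pvIsRep x && !rest.isEmpty then
       match pvNxt rest with
       | some e => pvRw e
       | none => x
     else x) :: pvGB rest

lemma pvIsRep_iff (l : List (Int × String)) : pvIsRep l = true ↔ l = [((0 : Int), "UNK")] := by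
  match l with
  | [] => simp [pvIsRep]
  | [a] => simp [pvIsRep, PySem.List.pyGet?, PySem.List.pyIdx?]
  | a :: b :: t => simp [pvIsRep]
lemma pvAll_rep (rest : List (List (Int × String))) (hnone : pvNxt rest = none) :
    ∀ y ∈ rest, y = [((0 : Int), "UNK")] := by
  intro y hy
  have := List.find?_eq_none.mp hnone y hy
  simp at this
  exact (pvIsRep_iff y).mp this

-- ---- B side ----
lemma pvB_loop (xs : List (List (Int × String))) :
    xs.reverse.foldl pvStepB ([], none, true) = ((pvGB xs).reverse, pvNxt xs, xs.isEmpty) := by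
  induction xs with
  | nil => simp [pvGB, pvNxt]
  | cons x rest ih =>
    rw [List.reverse_cons, List.foldl_append, ih]
    simp only [List.foldl_cons, List.foldl_nil, pvStepB, pvGB, pvNxt, List.find?_cons, pvRw]
    cases hx : pvIsRep x <;> simp [List.reverse_cons]
    split <;> simp
lemma pvB_eq (xs : List (List (Int × String))) :
    rectify_key_list_with_repeatition_rewrite_alt xs = pvGB xs := by
  unfold rectify_key_list_with_repeatition_rewrite_alt
  rw [pvB_loop]
  exact List.reverse_reverse _

-- ---- A side ----
lemma pvInnerA_found (l : List Int) (lst : List (List (Int × String))) (st : Int × Bool)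
    (h : st.2 = true) : l.foldl (pvInnerA lst) st = st := by
  induction l with
  | nil => rfl
  | cons j l ih => simp [List.foldl_cons, pvInnerA, h, ih]

lemma pvInnerA_spec (tail : List (List (Int × String))) : ∀ (b : Nat) (lst : List (List (Int × String))) (i : Int),
    lst.drop b = tail →
    ((PySem.List.pyRange (b : Int) (lst.length : Int) 1).foldl (pvInnerA lst) (i, false) = (i, false)
        ∧ pvNxt tail = none)
    ∨ (∃ (k : Nat) (e : List (Int × String)), b ≤ k ∧ lst[k]? = some e ∧ pvNxt tail = some e ∧
        (PySem.List.pyRange (b : Int) (lst.length : Int) 1).foldl (pvInnerA lst) (i, false) = ((k : Int), true)) := by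
  induction tail with
  | nil =>
    intro b lst i h
    have hb : lst.length ≤ b := List.drop_eq_nil_iff.mp h
    left
    rw [PySem.List.pyRange_one_eq_nil (by exact_mod_cast hb)]
    exact ⟨rfl, rfl⟩
  | cons t ts ih =>
    intro b lst i h
    have hb : b < lst.length := by
      by_contra hc
      rw [List.drop_eq_nil_iff.mpr (by omega)] at h
      simp at h
    have hget : lst[b]? = some t := by
      have := (List.getElem?_drop (xs := lst) (i := b) (j := 0)).symm
      rw [h] at this; simpa using this
    have hdrop : lst.drop (b + 1) = ts := by
      have : lst.drop (b + 1) = (lst.drop b).drop 1 := by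
        rw [← List.drop_drop]
      rw [this, h]; rfl
    rw [PySem.List.pyRange_one_cons (by exact_mod_cast hb), List.foldl_cons]
    have hgetD : PySem.List.pyGetD lst (b : Int) [] = t := by
      simp [PySem.List.pyGetD_natCast, List.getD_eq_getElem?_getD, hget]
    cases hrep : pvIsRep t with
    | false =>
      right
      refine ⟨b, t, le_refl _, hget, ?_, ?_⟩
      · simp [pvNxt, hrep]
      · show List.foldl (pvInnerA lst) (pvInnerA lst (i, false) (b : Int)) _ = _
        have hstep : pvInnerA lst (i, false) (b : Int) = ((b : Int), true) := by
          simp [pvInnerA, hgetD, hrep]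
        rw [hstep, pvInnerA_found _ _ _ rfl]
    | true =>
      have hstep : pvInnerA lst (i, false) (b : Int) = (i, false) := by
        simp [pvInnerA, hgetD, hrep]
      rw [hstep]
      have hcast : (b : Int) + 1 = ((b + 1 : Nat) : Int) := by push_cast; ring
      rw [hcast]
      have hfind : pvNxt (t :: ts) = pvNxt ts := by
        simp [pvNxt, hrep]
      rcases ih (b + 1) lst i hdrop with ⟨h1, h2⟩ | ⟨k, e, hk, hke, hf, hfold⟩
      · left; exact ⟨h1, by rw [hfind]; exact h2⟩
      · right; exact ⟨k, e, by omega, hke, by rw [hfind]; exact hf, hfold⟩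
lemma pvA_outer (tail : List (List (Int × String))) : ∀ (b : Nat) (lst : List (List (Int × String))) (L : Int),
    lst.drop b = tail → L = (lst.length : Int) →
    (PySem.List.pyRange (b : Int) L 1).foldl (pvStepA L) lst = lst.take b ++ pvGA tail := by
  induction tail with
  | nil =>
    intro b lst L h hL
    have hb : lst.length ≤ b := List.drop_eq_nil_iff.mp h
    rw [hL, PySem.List.pyRange_one_eq_nil (by exact_mod_cast hb), List.foldl_nil, pvGA,
      List.append_nil, List.take_of_length_le hb]
  | cons t ts ih =>
    intro b lst L h hL
    have hb : b < lst.length := by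
      by_contra hc
      rw [List.drop_eq_nil_iff.mpr (by omega)] at h
      simp at h
    have hget : lst[b]? = some t := by
      have := (List.getElem?_drop (xs := lst) (i := b) (j := 0)).symm
      rw [h] at this; simpa using this
    have hdrop : lst.drop (b + 1) = ts := by
      have h2 : lst.drop (b + 1) = (lst.drop b).drop 1 := by rw [← List.drop_drop]
      rw [h2, h]; rfl
    have hts : ts.length = lst.length - (b + 1) := by
      have := congrArg List.length hdrop; simpa using this.symm
    have hgetD : PySem.List.pyGetD lst (b : Int) [] = t := by
      simp [PySem.List.pyGetD_natCast, List.getD_eq_getElem?_getD, hget]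
    have htake : lst.take (b + 1) = lst.take b ++ [t] := by
      rw [List.take_add_one, hget]; rfl
    rw [hL, PySem.List.pyRange_one_cons (by exact_mod_cast hb), List.foldl_cons]
    by_cases hcond : (pvIsRep t && decide ((b : Int) < (lst.length : Int) - 1)) = true
    · -- rewriting branch
      have hrep : pvIsRep t = true := by simp at hcond; exact hcond.1
      have hlt : b + 1 < lst.length := by
        simp at hcond; have := hcond.2; omega
      have htsne : ts ≠ [] := by
        intro hts0; rw [hts0] at hts; simp at hts; omega
      have hcast : (b : Int) + 1 = ((b + 1 : Nat) : Int) := by push_cast; ring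
      have hstep : pvStepA (lst.length : Int) lst (b : Int) =
          PySem.List.pySetD (PySem.List.pySetD lst (b : Int) []) (b : Int)
            ((PySem.List.pyGetD (PySem.List.pySetD lst (b : Int) [])
              (((PySem.List.pyRange ((b : Int) + 1) (lst.length : Int) 1).foldl (pvInnerA lst) ((b : Int), false)).1) []).foldl
              (fun acc t => acc ++ [((0 : Int), t.2)]) []) := by
        rw [pvStepA, if_pos (by rw [hgetD]; exact hcond)]
      rw [hstep, hcast]
      rcases pvInnerA_spec ts (b + 1) lst (b : Int) hdrop with ⟨hfold, hnone⟩ | ⟨k, e, hk, hke, hf, hfold⟩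
      · -- no non-repeating entry after: Python reads the freshly-emptied lst[b]
        rw [hfold]
        simp only [PySem.List.pySetD_natCast]
        have hread : PySem.List.pyGetD (lst.set b []) (b : Int) [] = ([] : List (Int × String)) := by
          simp [PySem.List.pyGetD_natCast, List.getD_eq_getElem?_getD, List.getElem?_set_self hb]
        rw [hread]
        simp only [List.foldl_nil, List.set_set]
        have := ih (b + 1) (lst.set b []) (lst.length : Int) (by rw [List.drop_set_of_lt (by omega), hdrop]) (by simp)
        rw [this]
        rw [show (lst.set b []).take (b+1) = lst.take b ++ [[]] by
            rw [List.take_add_one, List.getElem?_set_self hb, List.take_set_of_le (le_refl b)]; rfl]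
        rw [pvGA]
        simp [hrep, htsne, hnone]
      · -- found at k > b
        rw [hfold]
        simp only [PySem.List.pySetD_natCast]
        have hread : PySem.List.pyGetD (lst.set b []) ((k : Nat) : Int) [] = e := by
          simp only [PySem.List.pyGetD_natCast, List.getD_eq_getElem?_getD]
          rw [List.getElem?_set_ne (by omega), hke]
          rfl
        rw [hread]
        rw [PySem.List.foldl_append_singleton_eq_map]
        simp only [List.nil_append, List.set_set]
        have := ih (b + 1) (lst.set b (pvRw e)) (lst.length : Int) (by rw [List.drop_set_of_lt (by omega), hdrop]) (by simp)
        rw [show (e.map fun t => ((0:Int), t.2)) = pvRw e from rfl, this]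
        rw [show (lst.set b (pvRw e)).take (b+1) = lst.take b ++ [pvRw e] by
          rw [List.take_add_one, List.getElem?_set_self hb, List.take_set_of_le (le_refl b)]; rfl]
        rw [pvGA]
        simp [hrep, htsne, hf]
    · -- no-rewrite branch
      have hstep : pvStepA (lst.length : Int) lst (b : Int) = lst := by
        rw [pvStepA, if_neg (by rw [hgetD]; exact hcond)]
      have hcast : (b : Int) + 1 = ((b + 1 : Nat) : Int) := by push_cast; ring
      rw [hstep, hcast, ih (b + 1) lst (lst.length : Int) hdrop rfl, htake]
      rw [pvGA]
      have : (if pvIsRep t && !ts.isEmpty then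
          match pvNxt ts with
          | some e => pvRw e
          | none => [] else t) = t := by
        by_cases hrep : pvIsRep t = true
        · have hts0 : ts = [] := by
            by_cases h0 : ts = []
            · exact h0
            · exfalso; apply hcond
              simp [hrep]
              have : 0 < ts.length := List.length_pos_iff.mpr h0
              omega
          simp [hts0]
        · simp [Bool.eq_false_iff.mpr hrep]
      rw [this, List.append_assoc]; rfl
lemma pvA_eq (xs : List (List (Int × String))) :
    rectify_key_list_with_repeatition_rewrite xs = pvGA xs := by
  have h := pvA_outer xs 0 xs (xs.length : Int) (by simp) rfl
  simpa [rectify_key_list_with_repeatition_rewrite] using h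

-- ---- relating pvGA and pvGB ----
lemma pvD_len (xs : List (List (Int × String))) (h : D_rectify_key_list_with_repeatition_rewrite xs) : 2 ≤ xs.length := by
  have := congrArg List.length h
  simp [List.length_drop] at this
  omega

lemma pvD_of_tail (x : List (Int × String)) (rest : List (List (Int × String)))
    (h : D_rectify_key_list_with_repeatition_rewrite rest) : D_rectify_key_list_with_repeatition_rewrite (x :: rest) := by
  have hlen := pvD_len rest h
  show (x :: rest).drop ((x :: rest).length - 2) = _
  have : (x :: rest).length - 2 = (rest.length - 2) + 1 := by simp; omega
  rw [this, List.drop_succ_cons]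
  exact h

lemma pvD_of_allrep (x : List (Int × String)) (rest : List (List (Int × String)))
    (hx : pvIsRep x = true) (hne : rest ≠ []) (hnone : pvNxt rest = none) :
    D_rectify_key_list_with_repeatition_rewrite (x :: rest) := by
  have hall : ∀ y ∈ x :: rest, y = [((0 : Int), "UNK")] := by
    intro y hy
    rcases List.mem_cons.mp hy with h | h
    · rw [h]; exact (pvIsRep_iff x).mp hx
    · exact pvAll_rep rest hnone y h
  have hrepl : x :: rest = List.replicate (x :: rest).length [((0 : Int), "UNK")] :=
    List.eq_replicate_of_mem hall
  show (x :: rest).drop ((x :: rest).length - 2) = _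
  rw [hrepl]
  have h2 : 2 ≤ (x :: rest).length := by
    simp
    exact List.length_pos_iff.mpr hne
  rw [List.drop_replicate, List.length_replicate]
  have : (x :: rest).length - ((x :: rest).length - 2) = 2 := by omega
  rw [this]
  rfl

lemma pvGA_eq_pvGB (xs : List (List (Int × String))) (h : ¬ D_rectify_key_list_with_repeatition_rewrite xs) : pvGA xs = pvGB xs := by
  induction xs with
  | nil => rfl
  | cons x rest ih =>
    have hrest : ¬ D_rectify_key_list_with_repeatition_rewrite rest := fun hr => h (pvD_of_tail x rest hr)
    rw [pvGA, pvGB, ih hrest]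
    congr 1
    by_cases hc : (pvIsRep x && !rest.isEmpty) = true
    · rw [if_pos hc, if_pos hc]
      cases hf : pvNxt rest with
      | some e => rfl
      | none =>
        exfalso
        have hne : rest ≠ [] := by
          simp at hc; intro h0; rw [h0] at hc; simp at hc
        exact h (pvD_of_allrep x rest (by simp at hc; exact hc.1) hne hf)
    · rw [if_neg hc, if_neg hc]

lemma pvGA_ne_pvGB (xs : List (List (Int × String))) (h : D_rectify_key_list_with_repeatition_rewrite xs) : pvGA xs ≠ pvGB xs := by
  induction xs with
  | nil => exact absurd (pvD_len [] h) (by simp)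
  | cons x rest ih =>
    by_cases hr : D_rectify_key_list_with_repeatition_rewrite rest
    · rw [pvGA, pvGB]
      intro heq
      exact ih hr (List.cons.injEq _ _ _ _ ▸ heq).2
    · have hlen := pvD_len _ h
      have hne : rest ≠ [] := by
        intro h0; rw [h0] at hlen; simp at hlen
      match rest, hne, hr, h with
      | [y], _, _, h =>
        have : x = [((0 : Int), "UNK")] ∧ y = [((0 : Int), "UNK")] := by
          have := h
          simp [D_rectify_key_list_with_repeatition_rewrite] at this
          exact this
        rw [this.1, this.2]
        decide
      | y :: z :: t, _, hr, h =>
        exfalso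
        apply hr
        have hl : (x :: y :: z :: t).length - 2 = ((y :: z :: t).length - 2) + 1 := by
          simp
        have h2 : (x :: y :: z :: t).drop ((x :: y :: z :: t).length - 2) =
            [[((0 : Int), "UNK")], [((0 : Int), "UNK")]] := h
        rw [hl, List.drop_succ_cons] at h2
        exact h2

-- ===== VERDICT (by name: the statement is the Claim_ definition above) =====
theorem rectify_key_list_with_repeatition_rewrite_spec : Claim_unchanged_rectify_key_list_with_repeatition_rewrite := by
  intro xs _ hD
  rw [pvA_eq, pvB_eq]
  exact pvGA_eq_pvGB xs hD

theorem rectify_key_list_with_repeatition_rewrite_changed : Claim_changed_rectify_key_list_with_repeatition_rewrite := by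
  unfold Claim_changed_rectify_key_list_with_repeatition_rewrite; decide

theorem rectify_key_list_with_repeatition_rewrite_tight : Claim_exact_rectify_key_list_with_repeatition_rewrite := by
  intro xs _ hD
  rw [pvA_eq, pvB_eq]
  exact pvGA_ne_pvGB xs hD
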